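-- pv_equiv track=rewrite | github.com/webbo28104-sketch/magnolia-analytics | app/routes/reports.py | _par_type_gir_breakdown
-- ===== SOURCE A (Python) =====
-- def _par_type_gir_breakdown(holes_data: list) -> dict:
--     """GIR count and rate segmented by par type."""
--     result = {}
--     for par in (3, 4, 5):
--         subset = [h for h in holes_data if h['par'] == par]
--         if not subset:
--             continue
--         girs = sum(1 for h in subset if h['gir'])
--         result[par] = {
--             'holes':   len(subset),
--             'girs':    girs,
--             'gir_pct': round(girs / len(subset) * 100),
--         }
--     return result
-- ===== SOURCE B (Python) =====
-- def _par_type_gir_breakdown(holes_data: list) -> dict: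
--     """GIR count and rate segmented by par type (single pass over holes_data)."""
--     h3 = g3 = h4 = g4 = h5 = g5 = 0
--     for h in holes_data:
--         par = h['par']
--         if par == 3:
--             h3 += 1
--             if h['gir']:
--                 g3 += 1
--         elif par == 4:
--             h4 += 1
--             if h['gir']:
--                 g4 += 1
--         elif par == 5:
--             h5 += 1
--             if h['gir']:
--                 g5 += 1
--     result = {}
--     for par, holes, girs in ((3, h3, g3), (4, h4, g4), (5, h5, g5)):
--         if holes:
--             result[par] = {'holes': holes, 'girs': girs,
--                            'gir_pct': round(girs / holes * 100)}
--     return result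
-- ===== Notes on version B (the rewrite author's own statement) =====
-- stated objective: alternative
-- what changed: B replaces A's three filtered scans of holes_data (one per par type, each materialising a sublist and counting it again) with a single aggregating pass maintaining six counters, building the result from the counters afterwards.
import Mathlib
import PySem

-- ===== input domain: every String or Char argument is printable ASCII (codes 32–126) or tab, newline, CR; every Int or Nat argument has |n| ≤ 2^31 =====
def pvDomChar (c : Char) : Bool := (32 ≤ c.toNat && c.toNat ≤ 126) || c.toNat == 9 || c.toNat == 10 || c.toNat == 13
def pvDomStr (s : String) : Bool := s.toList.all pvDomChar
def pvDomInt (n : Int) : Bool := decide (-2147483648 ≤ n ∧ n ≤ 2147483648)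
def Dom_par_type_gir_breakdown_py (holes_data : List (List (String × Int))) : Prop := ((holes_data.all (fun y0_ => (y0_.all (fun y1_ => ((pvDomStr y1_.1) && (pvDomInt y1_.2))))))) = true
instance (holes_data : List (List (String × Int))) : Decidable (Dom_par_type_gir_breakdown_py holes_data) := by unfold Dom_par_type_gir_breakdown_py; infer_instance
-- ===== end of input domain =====

-- B replaces A's three filtered scans of holes_data with one aggregating pass over six counters; equivalence proved on inputs where A raises no KeyError.


-- ---- shared helpers: dict lookup and Python's round(g / n * 100) ----

-- h[k] with default 0; faithful whenever the key is present (Pre_ guarantees that where it matters)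
def pvGet (h : List (String × Int)) (k : String) : Int := (h.lookup k).getD 0

-- nearest integer to a/b, ties to even (a ≥ 0, b > 0); exact integer arithmetic
def pvRnd2 (a b : Int) : Int :=
  let q := a / b
  let r := a % b
  if 2 * r < b then q else if 2 * r > b then q + 1 else if q % 2 = 0 then q else q + 1

-- smallest s with x * 2^s ≥ target (fuel-bounded doubling; fuel 400 suffices for every input the domain admits)
def pvFindS : Nat → Int → Int → Nat
  | 0, _, _ => 0
  | fuel + 1, x, target => if target ≤ x then 0 else 1 + pvFindS fuel (2 * x) target

-- Python's round(g / n * 100) for 0 ≤ g ≤ n, n > 0: IEEE-double division g/n, product ·100, then round-half-even —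
-- each step simulated exactly with integers (53-bit round-to-nearest-even significands)
def pvRound100 (g n : Int) : Int :=
  if g ≤ 0 then 0
  else
    let s := pvFindS 400 g ((2 : Int) ^ 52 * n)
    let q := pvRnd2 (g * 2 ^ s) n
    let qs : Int × Nat := if q = 2 ^ 53 then ((2 : Int) ^ 52, s - 1) else (q, s)
    let p := 100 * qs.1
    let t := pvFindS 400 ((2 : Int) ^ 53) (p + 1)
    let q2 := pvRnd2 p ((2 : Int) ^ t)
    let q2t : Int × Nat := if q2 = 2 ^ 53 then ((2 : Int) ^ 52, t + 1) else (q2, t)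
    if qs.2 ≤ q2t.2 then q2t.1 * 2 ^ (q2t.2 - qs.2) else pvRnd2 q2t.1 ((2 : Int) ^ (qs.2 - q2t.2))

-- ===== PORT A =====
-- sum(1 for h in subset if h['gir'])
def pvGirs (subset : List (List (String × Int))) : Int :=
  subset.foldl (fun acc h => if pvGet h "gir" ≠ 0 then acc + 1 else acc) 0

-- result[par] = {...} on fresh distinct keys 3,4,5 in increasing loop order = append to the association list
def par_type_gir_breakdown_py (holes_data : List (List (String × Int))) : List (Int × List (String × Int)) :=
  ([3, 4, 5] : List Int).foldl
    (fun result par =>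
      let subset := holes_data.filter (fun h => pvGet h "par" == par)
      if subset.isEmpty then result
      else
        let girs := pvGirs subset
        result ++ [(par, [("holes", (subset.length : Int)), ("girs", girs),
                          ("gir_pct", pvRound100 girs (subset.length : Int))])])
    []

-- ===== PORT B =====
-- loop body: one hole updates the six counters (h3, g3, h4, g4, h5, g5)
def pvStepB (st : Int × Int × Int × Int × Int × Int) (h : List (String × Int)) :
    Int × Int × Int × Int × Int × Int :=
  let (h3, g3, h4, g4, h5, g5) := st
  let par := pvGet h "par"
  if par == 3 then (h3 + 1, if pvGet h "gir" ≠ 0 then g3 + 1 else g3, h4, g4, h5, g5)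
  else if par == 4 then (h3, g3, h4 + 1, if pvGet h "gir" ≠ 0 then g4 + 1 else g4, h5, g5)
  else if par == 5 then (h3, g3, h4, g4, h5 + 1, if pvGet h "gir" ≠ 0 then g5 + 1 else g5)
  else st

-- one pass maintaining the six counters; result built afterwards from the three counter pairs
def par_type_gir_breakdown_py_alt (holes_data : List (List (String × Int))) : List (Int × List (String × Int)) :=
  let st := holes_data.foldl pvStepB ((0, 0, 0, 0, 0, 0) : Int × Int × Int × Int × Int × Int)
  let (h3, g3, h4, g4, h5, g5) := st
  (if h3 ≠ 0 then [((3 : Int), [("holes", h3), ("girs", g3), ("gir_pct", pvRound100 g3 h3)])] else [])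
    ++ (if h4 ≠ 0 then [((4 : Int), [("holes", h4), ("girs", g4), ("gir_pct", pvRound100 g4 h4)])] else [])
    ++ (if h5 ≠ 0 then [((5 : Int), [("holes", h5), ("girs", g5), ("gir_pct", pvRound100 g5 h5)])] else [])

-- ===== PRECONDITION & SPEC =====
-- Pre_ excludes exactly the inputs where Python A raises KeyError: a hole without 'par', or a hole
-- whose par is 3/4/5 but has no 'gir' key.
def Pre_par_type_gir_breakdown_py (holes_data : List (List (String × Int))) : Prop :=
  ∀ h ∈ holes_data, (h.lookup "par").isSome ∧
    ((pvGet h "par" = 3 ∨ pvGet h "par" = 4 ∨ pvGet h "par" = 5) → (h.lookup "gir").isSome)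
instance (holes_data : List (List (String × Int))) : Decidable (Pre_par_type_gir_breakdown_py holes_data) := by
  unfold Pre_par_type_gir_breakdown_py; infer_instance

def pvWitness_par_type_gir_breakdown_py : (List (List (String × Int))) :=
  [[("par", 4), ("gir", 1)], [("par", 4), ("gir", 0)], [("par", 3), ("gir", 1)], [("par", 6)]]

def Spec_par_type_gir_breakdown_py (holes_data : List (List (String × Int))) (out : List (Int × List (String × Int))) : Prop := out = par_type_gir_breakdown_py_alt holes_data
instance (holes_data : List (List (String × Int))) (out : List (Int × List (String × Int))) : Decidable (Spec_par_type_gir_breakdown_py holes_data out) := by unfold Spec_par_type_gir_breakdown_py; infer_instance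

-- ===== CLAIM (what is proved, stated in full; the proofs are below) =====
def Claim_equal_par_type_gir_breakdown_py : Prop := ∀ (holes_data : List (List (String × Int))), Dom_par_type_gir_breakdown_py holes_data → Pre_par_type_gir_breakdown_py holes_data → Spec_par_type_gir_breakdown_py holes_data (par_type_gir_breakdown_py holes_data)

-- ===== LEMMAS AND PROOFS =====

-- number of holes in t with a truthy 'gir'
def pvGCount (t : List (List (String × Int))) : Int :=
  ((t.filter (fun h => pvGet h "gir" != 0)).length : Int)

theorem pvGirs_foldl (t : List (List (String × Int))) (a : Int) :
    t.foldl (fun acc h => if pvGet h "gir" ≠ 0 then acc + 1 else acc) a = a + pvGCount t := by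
  induction t generalizing a with
  | nil => simp [pvGCount]
  | cons h t ih =>
    simp only [List.foldl_cons]
    rw [ih]
    by_cases hg : pvGet h "gir" = 0 <;>
      simp [pvGCount, List.filter_cons, hg] <;> push_cast <;> ring

theorem pvGirs_eq (t : List (List (String × Int))) : pvGirs t = pvGCount t := by
  simpa [pvGirs] using pvGirs_foldl t 0

theorem pvFold_spec (xs : List (List (String × Int))) (a b c d e f : Int) :
    xs.foldl pvStepB (a, b, c, d, e, f) =
    (a + ((xs.filter (fun h => pvGet h "par" == 3)).length : Int),
     b + pvGCount (xs.filter (fun h => pvGet h "par" == 3)),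
     c + ((xs.filter (fun h => pvGet h "par" == 4)).length : Int),
     d + pvGCount (xs.filter (fun h => pvGet h "par" == 4)),
     e + ((xs.filter (fun h => pvGet h "par" == 5)).length : Int),
     f + pvGCount (xs.filter (fun h => pvGet h "par" == 5))) := by
  induction xs generalizing a b c d e f with
  | nil => simp [pvGCount]
  | cons h t ih =>
    simp only [List.foldl_cons]
    by_cases hg : pvGet h "gir" = 0 <;>
      [skip; skip] <;>
    (by_cases h3 : pvGet h "par" = 3
     · rw [show pvStepB (a, b, c, d, e, f) h
             = (a + 1, if pvGet h "gir" ≠ 0 then b + 1 else b, c, d, e, f) from by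
           simp [pvStepB, h3]]
       rw [ih]
       simp [pvGCount, List.filter_cons, h3, hg]
       and_intros <;> push_cast <;> ring
     · by_cases h4 : pvGet h "par" = 4
       · rw [show pvStepB (a, b, c, d, e, f) h
               = (a, b, c + 1, if pvGet h "gir" ≠ 0 then d + 1 else d, e, f) from by
             simp [pvStepB, h3, h4]]
         rw [ih]
         simp [pvGCount, List.filter_cons, h3, h4, hg]
         and_intros <;> push_cast <;> ring
       · by_cases h5 : pvGet h "par" = 5
         · rw [show pvStepB (a, b, c, d, e, f) h
                 = (a, b, c, d, e + 1, if pvGet h "gir" ≠ 0 then f + 1 else f) from by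
               simp [pvStepB, h3, h4, h5]]
           rw [ih]
           simp [pvGCount, List.filter_cons, h3, h4, h5, hg]
           and_intros <;> push_cast <;> ring
         · rw [show pvStepB (a, b, c, d, e, f) h = (a, b, c, d, e, f) from by
               simp [pvStepB, h3, h4, h5]]
           rw [ih]
           simp [List.filter_cons, h3, h4, h5])

-- ===== VERDICT (by name: the statement is the Claim_ definition above) =====
theorem par_type_gir_breakdown_py_spec : Claim_equal_par_type_gir_breakdown_py := by
  intro holes_data _ _
  unfold Spec_par_type_gir_breakdown_py par_type_gir_breakdown_py par_type_gir_breakdown_py_alt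
  rw [pvFold_spec]
  simp only [List.foldl, zero_add, pvGirs_eq]
  by_cases e3 : (holes_data.filter (fun h => pvGet h "par" == 3)) = [] <;>
    by_cases e4 : (holes_data.filter (fun h => pvGet h "par" == 4)) = [] <;>
      by_cases e5 : (holes_data.filter (fun h => pvGet h "par" == 5)) = [] <;>
        simp [e3, e4, e5, List.isEmpty_iff, List.length_eq_zero_iff, pvGirs_eq]
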